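-- pv_equiv track=rewrite | github.com/elMass9/Linear-systems | 2022EMR201_Section4_AssessmentPack/Section 4/a2022EMR201A04_Submission.py | search_prod
-- ===== SOURCE A (Python) =====
-- def search_prod(stock_list: list, prod_name: str) -> tuple:
--     """Searches for the given product name and returns the indices of
--     where to find the product within the stock list.
--
--      Args:
--         stock_list (list):  list of lists containing the list of product
--                             names, followed by the list of product quantity,
--                             followed by list of prices.
--         prod_name (str): name of product to search for.
--
--     Returns:
--         prod_index (tuple): The indices of where to find the product name
--                             in the stock list.
--     """
--     # Write code below this line, DO NOT EDIT ABOVE THIS LINE ----------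
--
--     # Store the result
--     prod_index = None
--     prod_index =(None, None)
--     n=len(stock_list[0])
--     for i in range(n):
--         if(stock_list[0][i]==prod_name):
--             prod_index = (0,i)
--     # Write code above this line, DO NOT EDIT BELOW THIS LINE ----------
--     return prod_index
-- ===== SOURCE B (Python) =====
-- def search_prod(stock_list: list, prod_name: str) -> tuple:
--     # Reverse search with early exit: first match from the right is the last match.
--     n = len(stock_list[0])
--     for i in range(n - 1, -1, -1):
--         if stock_list[0][i] == prod_name:
--             return (0, i)
--     return (None, None)
-- ===== Notes on version B (the rewrite author's own statement) =====
-- stated objective: idiomatic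
-- what changed: B scans the name row backwards and returns at the first match (the last occurrence), instead of A's full forward scan that overwrites the result on every match.
import Mathlib
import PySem

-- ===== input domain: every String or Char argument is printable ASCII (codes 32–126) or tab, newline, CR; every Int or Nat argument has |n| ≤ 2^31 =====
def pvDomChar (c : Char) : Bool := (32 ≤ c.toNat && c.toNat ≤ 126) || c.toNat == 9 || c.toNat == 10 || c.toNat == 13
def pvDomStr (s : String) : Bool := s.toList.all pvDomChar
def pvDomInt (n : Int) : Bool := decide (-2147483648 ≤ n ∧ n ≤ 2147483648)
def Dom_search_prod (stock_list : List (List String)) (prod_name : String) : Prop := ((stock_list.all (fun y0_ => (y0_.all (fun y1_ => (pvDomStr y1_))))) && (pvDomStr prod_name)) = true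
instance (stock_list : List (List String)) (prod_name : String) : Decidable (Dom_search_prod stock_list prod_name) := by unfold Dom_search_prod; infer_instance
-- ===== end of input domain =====

-- B searches the name row from the right and returns at the first match; A scans forward, overwriting the result.
-- Return-value equivalence on nonempty stock_list (A raises IndexError on stock_list == []).

-- ===== PORT A =====
-- A: prod_index = (None, None); for i in range(n): if row[i] == prod_name: prod_index = (0, i); return prod_index
def search_prod (stock_list : List (List String)) (prod_name : String) : Option Int × Option Int :=
  let row := stock_list.headD []
  let n := row.length
  (PySem.List.pyRange 0 n 1).foldl
    (fun acc i =>
      if row.getD i.toNat "" = prod_name then (some 0, some i) else acc)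
    (none, none)

-- ===== PORT B =====
-- B: for i in range(n-1, -1, -1): if row[i] == prod_name: return (0, i); return (None, None)
def findLastIdx (row : List String) (prod_name : String) : Nat → Option Int × Option Int
  | 0 => (none, none)
  | i + 1 =>
    if row.getD i "" = prod_name then (some 0, some (i : Int))
    else findLastIdx row prod_name i

def search_prod_alt (stock_list : List (List String)) (prod_name : String) : Option Int × Option Int :=
  let row := stock_list.headD []
  findLastIdx row prod_name row.length

-- ===== PRECONDITION & SPEC =====
-- Pre_ excludes exactly the empty stock_list, on which A (and B) raise IndexError at stock_list[0].
def Pre_search_prod (stock_list : List (List String)) (prod_name : String) : Prop := stock_list ≠ []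
instance (stock_list : List (List String)) (prod_name : String) : Decidable (Pre_search_prod stock_list prod_name) := by unfold Pre_search_prod; infer_instance
def pvWitness_search_prod : List (List String) × String := ([["apple", "pear", "apple"], ["1", "2", "3"], ["5", "6", "7"]], "apple")

def Spec_search_prod (stock_list : List (List String)) (prod_name : String) (out : Option Int × Option Int) : Prop := out = search_prod_alt stock_list prod_name
instance (stock_list : List (List String)) (prod_name : String) (out : Option Int × Option Int) : Decidable (Spec_search_prod stock_list prod_name out) := by unfold Spec_search_prod; infer_instance

-- ===== CLAIM (what is proved, stated in full; the proofs are below) =====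
def Claim_equal_search_prod : Prop := ∀ (stock_list : List (List String)) (prod_name : String), Dom_search_prod stock_list prod_name → Pre_search_prod stock_list prod_name → Spec_search_prod stock_list prod_name (search_prod stock_list prod_name)

-- ===== LEMMAS AND PROOFS =====

-- The forward last-match fold over range n equals the backward first-match search from n.
theorem foldl_eq_findLastIdx (row : List String) (prod_name : String) (n : Nat) :
    (PySem.List.pyRange 0 n 1).foldl
      (fun acc i =>
        if row.getD i.toNat "" = prod_name then ((some 0 : Option Int), some i) else acc)
      (none, none) = findLastIdx row prod_name n := by
  induction n with
  | zero => simp [PySem.List.pyRange, findLastIdx]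
  | succ k ih =>
    rw [show ((k + 1 : Nat) : Int) = (k : Int) + 1 by push_cast; ring,
        PySem.List.pyRange_one_succ_right (by omega), List.foldl_append, ih]
    simp [findLastIdx]

-- ===== VERDICT (by name: the statement is the Claim_ definition above) =====
theorem search_prod_spec : Claim_equal_search_prod := by
  intro stock_list prod_name _ _
  unfold Spec_search_prod search_prod search_prod_alt
  exact foldl_eq_findLastIdx _ _ _
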